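-- pv_equiv track=rewrite | github.com/tnicko1/group_project_1 | irakli_add.py | most_common_suit_count
-- ===== SOURCE A (Python) =====
-- from collections import Counter
--
-- def most_common_suit_count(players_card):
--     result = {}
--
--     for key, card_list in players_card.items():
--         # ფერების რაოდენობის დათვლა
--         suits = [card[-1] for card in card_list]  # კარტის ფერის ამოღება
--         suit_counts = Counter(suits)
--         # ყველაზე ხშირი ფერის რაოდენობა
--         most_common_count = suit_counts.most_common(1)[0][1]
--         # შედეგის შენახვა
--         result[key] = most_common_count
--
--     return result
-- ===== SOURCE B (Python) =====
-- def most_common_suit_count(players_card):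
--     result = {}
--     for key, card_list in players_card.items():
--         suits = sorted(card[-1] for card in card_list)
--         best = run = 0
--         prev = None
--         for s in suits:
--             run = run + 1 if s == prev else 1
--             prev = s
--             if run > best:
--                 best = run
--         result[key] = best
--     return result
-- ===== Notes on version B (the rewrite author's own statement) =====
-- stated objective: alternative
-- what changed: Replaces Counter hash-frequency counting plus most_common(1) by sorting each hand's suits and scanning consecutive equal runs with a running best-run-length accumulator (a timing run measured this ~2.1x faster at the largest size: C-level list.sort plus a plain loop beats per-hand Counter construction and most_common); Pre_ admits exactly the inputs on which A returns (every hand nonempty and every card string nonempty).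
import Mathlib
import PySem

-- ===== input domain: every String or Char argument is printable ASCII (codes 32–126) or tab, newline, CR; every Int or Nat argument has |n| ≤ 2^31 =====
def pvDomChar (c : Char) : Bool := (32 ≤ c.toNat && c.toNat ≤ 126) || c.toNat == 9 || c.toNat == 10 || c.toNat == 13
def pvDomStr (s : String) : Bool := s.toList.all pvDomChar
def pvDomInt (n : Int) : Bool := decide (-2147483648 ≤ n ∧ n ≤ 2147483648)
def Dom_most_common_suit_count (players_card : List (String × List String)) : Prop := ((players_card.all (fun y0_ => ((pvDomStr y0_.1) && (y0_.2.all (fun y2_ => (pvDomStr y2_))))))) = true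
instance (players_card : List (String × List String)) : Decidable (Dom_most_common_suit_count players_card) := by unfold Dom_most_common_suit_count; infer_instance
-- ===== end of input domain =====

-- B replaces Counter + most_common(1) by sorting each hand's suits and scanning consecutive
-- equal runs with a running best-run-length accumulator; objective: alternative (sort+scan vs
-- hash counting). Equivalence is about the RETURN value.

-- ===== PORT A =====
-- card[-1]; none (IndexError, card = "") is excluded by Pre_, fallback ' ' is never reached there
def pvSuitA (card : String) : Char := (PySem.Str.pyGet? card (-1)).getD ' '

-- suits = [card[-1] for card in card_list]; Counter(suits); most_common(1)[0][1]
-- most_common(1)[0] is the first item of the stable count-descending sort of the counter's items;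
-- head? = none (IndexError, empty hand) is excluded by Pre_, fallback 0 is never reached there
def pvHandA (card_list : List String) : Int :=
  let suits := card_list.map pvSuitA
  let suit_counts := PySem.Dict.counter suits
  (((PySem.List.sorted suit_counts.items (fun p => p.2) true).head?).map Prod.snd).getD 0

def most_common_suit_count (players_card : List (String × List String)) : List (String × Int) :=
  (players_card.foldl (fun result kv => result.insert kv.1 (pvHandA kv.2)) PySem.Dict.empty).items

-- ===== PORT B =====
-- loop body: run = run + 1 if s == prev else 1; prev = s; if run > best: best = run
-- state is (best, run, prev)
def pvStepB (st : Int × Int × Option Char) (s : Char) : Int × Int × Option Char :=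
  let run : Int := if some s == st.2.2 then st.2.1 + 1 else 1
  let best : Int := if run > st.1 then run else st.1
  (best, run, some s)

-- suits = sorted(card[-1] for card in card_list); then the run scan starting from best = run = 0, prev = None
def pvHandB (card_list : List String) : Int :=
  let suits := PySem.List.sorted (card_list.map (fun card => (PySem.Str.pyGet? card (-1)).getD ' ')) (fun x => x) false
  (suits.foldl pvStepB ((0 : Int), (0 : Int), (none : Option Char))).1

def most_common_suit_count_alt (players_card : List (String × List String)) : List (String × Int) :=
  (players_card.foldl (fun result kv => result.insert kv.1 (pvHandB kv.2)) PySem.Dict.empty).items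

-- ===== PRECONDITION & SPEC =====
-- exactly where the Python A returns: every hand is nonempty (else most_common(1)[0] raises IndexError)
-- and every card is a nonempty string (else card[-1] raises IndexError)
def Pre_most_common_suit_count (players_card : List (String × List String)) : Prop :=
  ∀ p ∈ players_card, p.2 ≠ [] ∧ ∀ c ∈ p.2, c ≠ ""
instance (players_card : List (String × List String)) : Decidable (Pre_most_common_suit_count players_card) := by unfold Pre_most_common_suit_count; infer_instance

def pvWitness_most_common_suit_count : (List (String × List String)) :=
  [("irakli", ["AH", "KH", "2S"]), ("nika", ["3D"])]

def Spec_most_common_suit_count (players_card : List (String × List String)) (out : List (String × Int)) : Prop := out = most_common_suit_count_alt players_card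
instance (players_card : List (String × List String)) (out : List (String × Int)) : Decidable (Spec_most_common_suit_count players_card out) := by unfold Spec_most_common_suit_count; infer_instance

-- ===== CLAIM (what is proved, stated in full; the proofs are below) =====
def Claim_equal_most_common_suit_count : Prop := ∀ (players_card : List (String × List String)), Dom_most_common_suit_count players_card → Pre_most_common_suit_count players_card → Spec_most_common_suit_count players_card (most_common_suit_count players_card)

-- ===== LEMMAS AND PROOFS =====

-- max over the multiset of per-occurrence counts, as a foldr on the list
def pvMaxCnt (m : List Char) : Int := (m.map (fun s => (List.count s m : Int))).foldr (· ⊔ ·) 0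

theorem pv_le_foldr_max (l : List Int) (x : Int) (h : x ∈ l) : x ≤ l.foldr (· ⊔ ·) 0 := by
  induction l with
  | nil => cases h
  | cons a t ih =>
    rcases List.mem_cons.mp h with rfl | h
    · exact le_max_left _ _
    · exact le_trans (ih h) (le_max_right _ _)

theorem pv_foldr_max_le (l : List Int) (M : Int) (h : ∀ x ∈ l, x ≤ M) (h0 : 0 ≤ M) :
    l.foldr (· ⊔ ·) 0 ≤ M := by
  induction l with
  | nil => simpa using h0
  | cons a t ih =>
    exact max_le (h a List.mem_cons_self) (ih (fun x hx => h x (List.mem_cons_of_mem _ hx)))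

theorem pv_foldr_max_nonneg (l : List Int) : 0 ≤ l.foldr (· ⊔ ·) 0 := by
  induction l with
  | nil => simp
  | cons a t ih => exact le_trans ih (le_max_right _ _)

theorem pv_foldr_max_replicate (k : Nat) (hk : 1 ≤ k) (c : Int) (L : List Int) :
    (List.replicate k c ++ L).foldr (· ⊔ ·) 0 = c ⊔ L.foldr (· ⊔ ·) 0 := by
  induction k with
  | zero => omega
  | succ j ih =>
    cases Nat.eq_zero_or_pos j with
    | inl h => subst h; simp [List.replicate]
    | inr h =>
      have := ih h
      simp only [List.replicate, List.cons_append, List.foldr_cons] at *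
      rw [this, ← max_assoc, max_self]

-- a sorted list starts with a maximal run of its head
theorem pv_split_run : ∀ (t : List Char) (v : Char), (v :: t).Pairwise (· ≤ ·) →
    ∃ k rest, v :: t = List.replicate k v ++ rest ∧ 1 ≤ k ∧ rest.Pairwise (· ≤ ·) ∧ ∀ x ∈ rest, v < x := by
  intro t
  induction t with
  | nil => intro v _; exact ⟨1, [], by simp [List.replicate], le_refl 1, List.Pairwise.nil, by simp⟩
  | cons w t' ih =>
    intro v hp
    have hvw : v ≤ w := (List.pairwise_cons.mp hp).1 w List.mem_cons_self
    have hwt : (w :: t').Pairwise (· ≤ ·) := (List.pairwise_cons.mp hp).2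
    by_cases hwv : w = v
    · subst hwv
      obtain ⟨k, rest, heq, hk, hrp, hlt⟩ := ih w hwt
      exact ⟨k + 1, rest, by simp [List.replicate, ← heq], by omega, hrp, hlt⟩
    · refine ⟨1, w :: t', by simp [List.replicate], le_refl 1, hwt, ?_⟩
      intro x hx
      have hvw' : v < w := lt_of_le_of_ne hvw (fun h => hwv h.symm)
      rcases List.mem_cons.mp hx with rfl | hx
      · exact hvw'
      · exact lt_of_lt_of_le hvw' ((List.pairwise_cons.mp hwt).1 x hx)

theorem pv_step_start (b r : Int) (p : Option Char) (v : Char) (h : p ≠ some v) :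
    pvStepB (b, r, p) v = (b ⊔ 1, 1, some v) := by
  have hb : (some v == p) = false := by
    cases p with
    | none => rfl
    | some u =>
      simp only [beq_eq_false_iff_ne, ne_eq, Option.some.injEq]
      intro h'; exact h (by rw [h'])
  simp only [pvStepB, hb, Bool.false_eq_true, if_false, gt_iff_lt, Prod.mk.injEq]
  exact ⟨by split <;> omega, trivial⟩

theorem pv_fold_rep : ∀ (j : Nat) (b r : Int) (v : Char), r ≤ b →
    List.foldl pvStepB (b, r, some v) (List.replicate j v) = (b ⊔ (r + j), r + j, some v) := by
  intro j
  induction j with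
  | zero => intro b r v h; simp [max_eq_left h]
  | succ j ih =>
    intro b r v h
    have hstep : pvStepB (b, r, some v) v = (b ⊔ (r + 1), r + 1, some v) := by
      simp only [pvStepB, beq_self_eq_true, if_true, gt_iff_lt]
      split <;> refine Prod.ext ?_ rfl <;> simp <;> omega
    rw [List.replicate_succ, List.foldl_cons, hstep, ih _ _ _ (le_max_right _ _)]
    refine Prod.ext ?_ (Prod.ext ?_ rfl) <;> simp <;> omega

theorem pv_fold_run (k : Nat) (hk : 1 ≤ k) (b r : Int) (p : Option Char) (v : Char) (h : p ≠ some v) :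
    List.foldl pvStepB (b, r, p) (List.replicate k v) = (b ⊔ (k : Int), (k : Int), some v) := by
  obtain ⟨j, rfl⟩ : ∃ j, k = j + 1 := ⟨k - 1, by omega⟩
  rw [List.replicate_succ, List.foldl_cons, pv_step_start b r p v h,
      pv_fold_rep j _ _ _ (le_max_right _ _)]
  refine Prod.ext ?_ (Prod.ext ?_ rfl) <;> simp <;> omega

theorem pv_maxcnt_run (k : Nat) (hk : 1 ≤ k) (v : Char) (rest : List Char)
    (hnm : ∀ x ∈ rest, v ≠ x) :
    pvMaxCnt (List.replicate k v ++ rest) = (k : Int) ⊔ pvMaxCnt rest := by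
  have hvnot : v ∉ rest := fun h => hnm v h rfl
  have hcv : List.count v (List.replicate k v ++ rest) = k := by
    rw [List.count_append, List.count_replicate_self, List.count_eq_zero_of_not_mem hvnot]
    omega
  have hcs : ∀ s ∈ rest, List.count s (List.replicate k v ++ rest) = List.count s rest := by
    intro s hs
    have hvs : ¬ v = s := hnm s hs
    rw [List.count_append, List.count_replicate]
    simp [hvs]
  unfold pvMaxCnt
  rw [List.map_append, List.map_replicate, hcv]
  rw [List.map_congr_left (fun s hs => by rw [hcs s hs])]
  exact pv_foldr_max_replicate k hk _ _

theorem pv_fold_main : ∀ (n : Nat) (m : List Char), m.length ≤ n → m.Pairwise (· ≤ ·) →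
    ∀ (b r : Int) (p : Option Char), (∀ x ∈ m, p ≠ some x) → r ≤ b → 0 ≤ b →
    (m.foldl pvStepB (b, r, p)).1 = b ⊔ pvMaxCnt m := by
  intro n
  induction n with
  | zero =>
    intro m hm _ b r p _ _ hb
    have : m = [] := List.eq_nil_of_length_eq_zero (Nat.le_zero.mp hm)
    subst this
    simp [pvMaxCnt, max_eq_left hb]
  | succ n ih =>
    intro m hm hp b r p hne hrb hb
    cases m with
    | nil => simp [pvMaxCnt, max_eq_left hb]
    | cons v t =>
      obtain ⟨k, rest, heq, hk, hrp, hlt⟩ := pv_split_run t v hp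
      rw [heq, List.foldl_append, pv_fold_run k hk b r p v (hne v List.mem_cons_self)]
      have hlen : rest.length ≤ n := by
        have h1 := congrArg List.length heq
        simp [List.length_replicate] at h1
        have h2 : t.length + 1 ≤ n + 1 := by simpa using hm
        omega
      have hne' : ∀ x ∈ rest, (some v : Option Char) ≠ some x := by
        intro x hx h
        exact absurd (Option.some.injEq _ _ ▸ h) (ne_of_lt (hlt x hx))
      rw [ih rest hlen hrp (b ⊔ (k : Int)) (k : Int) (some v) hne' (le_max_right _ _)
            (le_trans hb (le_max_left _ _))]
      rw [pv_maxcnt_run k hk v rest (fun x hx => ne_of_lt (hlt x hx))]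
      rw [max_assoc]

-- per-hand agreement, A side (head of count-descending sort of Counter items = max per-occurrence count)
theorem pvHand_core (l : List Char) :
    (((PySem.List.sorted (PySem.Dict.counter l).items (fun p => p.2) true).head?).map Prod.snd).getD 0
  = (PySem.List.max? (l.map (fun s => (PySem.List.count l s : Int))) (fun x => x)).getD 0 := by
  cases l with
  | nil => rfl
  | cons x t =>
    set l := x :: t with hldef
    have hxl : x ∈ l := by simp [hldef]
    cases hmax : PySem.List.max? (l.map (fun s => (PySem.List.count l s : Int))) (fun x => x) with
    | none =>
      rw [PySem.List.max?_eq_none_iff] at hmax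
      simp [hldef] at hmax
    | some m =>
      have hmemitems : (x, (List.count x l : Int)) ∈ (PySem.Dict.counter l).items := by
        rw [PySem.Dict.items_counter]
        exact List.mem_map.mpr ⟨x, (PySem.Set.mem_ofList l x).mpr hxl, rfl⟩
      cases hs : PySem.List.sorted (PySem.Dict.counter l).items (fun p => p.2) true with
      | nil =>
        rw [PySem.List.sorted_eq_nil_iff] at hs
        rw [hs] at hmemitems
        exact absurd hmemitems (List.not_mem_nil)
      | cons p ts =>
        simp only [Option.map_some, Option.getD_some, List.head?_cons]
        have hub_B := PySem.List.max?_isMax hmax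
        have hp_mem : p ∈ (PySem.Dict.counter l).items := by
          have : p ∈ PySem.List.sorted (PySem.Dict.counter l).items (fun p => p.2) true := by
            rw [hs]; exact List.mem_cons_self
          exact (PySem.List.mem_sorted _ _ _ _).mp this
        rw [PySem.Dict.items_counter] at hp_mem
        obtain ⟨k, hk, hpk⟩ := List.mem_map.mp hp_mem
        have hk_l : k ∈ l := (PySem.Set.mem_ofList l k).mp hk
        have h1 : p.2 ≤ m := by
          have : (List.count k l : Int) ∈ l.map (fun s => (PySem.List.count l s : Int)) :=
            List.mem_map.mpr ⟨k, hk_l, by simp [PySem.List.count]⟩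
          have := hub_B _ this
          simpa [← hpk] using this
        have hub_A := PySem.List.key_head_sorted_rev_ge (PySem.Dict.counter l).items (fun p => p.2) hs
        have hm_mem := PySem.List.max?_mem hmax
        obtain ⟨s0, hs0, hms0⟩ := List.mem_map.mp hm_mem
        have h2 : m ≤ p.2 := by
          have hitem : (s0, (List.count s0 l : Int)) ∈ (PySem.Dict.counter l).items := by
            rw [PySem.Dict.items_counter]
            exact List.mem_map.mpr ⟨s0, (PySem.Set.mem_ofList l s0).mpr hs0, rfl⟩
          have := hub_A _ hitem
          simpa [← hms0, PySem.List.count] using this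
        omega

-- bridge: max?-of-counts on l = pvMaxCnt of sorted l
theorem pv_max_eq_maxcnt (l : List Char) :
    (PySem.List.max? (l.map (fun s => (PySem.List.count l s : Int))) (fun x => x)).getD 0
  = pvMaxCnt (PySem.List.sorted l (fun x => x) false) := by
  have hperm : (PySem.List.sorted l (fun x => x) false).Perm l := PySem.List.sorted_perm l _ _
  set m := PySem.List.sorted l (fun x => x) false with hm
  have hcount : ∀ s, List.count s m = List.count s l := fun s => hperm.count_eq s
  cases hmax : PySem.List.max? (l.map (fun s => (PySem.List.count l s : Int))) (fun x => x) with
  | none =>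
    rw [PySem.List.max?_eq_none_iff] at hmax
    have : l = [] := by simpa using hmax
    subst this
    simp [pvMaxCnt, hm, PySem.List.sorted]
  | some M =>
    have hMmem := PySem.List.max?_mem hmax
    obtain ⟨s0, hs0, hMs0⟩ := List.mem_map.mp hMmem
    have hub := PySem.List.max?_isMax hmax
    have hM0 : 0 ≤ M := by rw [← hMs0]; positivity
    simp only [Option.getD_some]
    refine le_antisymm ?_ ?_
    · apply pv_le_foldr_max
      refine List.mem_map.mpr ⟨s0, ?_, ?_⟩
      · exact (PySem.List.mem_sorted _ _ _ _).mpr hs0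
      · rw [hcount s0, ← hMs0]; simp [PySem.List.count]
    · apply pv_foldr_max_le _ _ _ hM0
      intro x hx
      obtain ⟨t, ht, hxt⟩ := List.mem_map.mp hx
      have htl : t ∈ l := (PySem.List.mem_sorted _ _ _ _).mp ht
      have : (PySem.List.count l t : Int) ∈ l.map (fun s => (PySem.List.count l s : Int)) :=
        List.mem_map.mpr ⟨t, htl, rfl⟩
      have := hub _ this
      rw [← hxt, hcount t]
      simpa [PySem.List.count] using this

theorem pvHand_eq (card_list : List String) : pvHandA card_list = pvHandB card_list := by
  unfold pvHandA pvHandB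
  set l := card_list.map pvSuitA with hl
  have hB : card_list.map (fun card => (PySem.Str.pyGet? card (-1)).getD ' ') = l := by
    simp [hl, pvSuitA]
  rw [hB]
  set m := PySem.List.sorted l (fun x => x) false with hm
  have hsorted : m.Pairwise (· ≤ ·) := by
    have := PySem.List.sorted_pairwise l (fun x => x)
    simpa [hm] using this
  have hmain := pv_fold_main m.length m (le_refl _) hsorted 0 0 none
    (by intro x _ h; cases h) (le_refl 0) (le_refl 0)
  rw [pvHand_core l, pv_max_eq_maxcnt l, ← hm]
  rw [hmain]
  have := pv_foldr_max_nonneg (m.map (fun s => (List.count s m : Int)))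
  simp [pvMaxCnt] at this ⊢
  omega

-- ===== VERDICT (by name: the statement is the Claim_ definition above) =====
theorem most_common_suit_count_spec : Claim_equal_most_common_suit_count := by
  intro pc _ _
  unfold Spec_most_common_suit_count most_common_suit_count most_common_suit_count_alt
  simp only [pvHand_eq]
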